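-- pv_equiv track=rewrite | github.com/TheoDlmz/AxisRules | axisrules/misc/rankings/VoterDeletionRank.py | is_single_peaked
-- ===== SOURCE A (Python) =====
-- def is_single_peaked(axis, vote):
--     """
--     Check if a vote is single peaked for a given axis
--     """
--     curr = len(vote)+1
--     decr = True
--     for i in range(len(axis)):
--         v = vote[axis[i]]
--         if decr and v > curr:
--             decr = False
--         if not decr and v < curr:
--             return False
--         curr = v
--
--     return True
-- ===== SOURCE B (Python) =====
-- def is_single_peaked(axis, vote):
--     """
--     Check if a vote is single peaked for a given axis
--     """
--     vals = [len(vote) + 1] + [vote[c] for c in axis]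
--     i = 0
--     while i + 1 < len(vals) and vals[i + 1] <= vals[i]:
--         i += 1
--     return all(vals[j] <= vals[j + 1] for j in range(i, len(vals) - 1))
-- ===== Notes on version B (the rewrite author's own statement) =====
-- stated objective: alternative
-- what changed: Replaces A's single flag-driven loop (decr boolean, early return) by precomputing the value sequence and running two separate monotone scans: skip the non-increasing prefix, then check the rest is non-decreasing.
-- outside the precondition, e.g. on is_single_peaked([0, 1, 2, 3], {0: 1, 1: 2, 2: 1}): A returns False, B raises KeyError
import Mathlib
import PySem

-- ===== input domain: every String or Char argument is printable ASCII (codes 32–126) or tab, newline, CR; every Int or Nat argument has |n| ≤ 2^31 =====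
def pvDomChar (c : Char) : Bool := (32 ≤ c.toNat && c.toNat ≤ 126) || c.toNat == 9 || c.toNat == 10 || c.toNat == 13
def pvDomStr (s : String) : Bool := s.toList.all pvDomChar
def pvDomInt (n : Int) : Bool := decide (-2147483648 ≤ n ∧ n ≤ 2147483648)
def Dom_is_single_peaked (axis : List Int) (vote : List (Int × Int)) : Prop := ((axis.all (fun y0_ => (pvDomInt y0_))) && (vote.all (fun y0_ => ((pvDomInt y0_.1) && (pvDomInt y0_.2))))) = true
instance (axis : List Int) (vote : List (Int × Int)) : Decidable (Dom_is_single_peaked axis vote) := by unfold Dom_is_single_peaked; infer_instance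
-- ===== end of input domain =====

-- B replaces A's flag-driven loop by a prebuilt value sequence and two monotone scans (alternative decomposition, same cost).

-- ===== PORT A =====
-- the loop over axis with state (curr, decr); vote[axis[i]] is a dict lookup (KeyError excluded by Pre_,
-- the port reads the value with getD 0 there)
def pvIsSpLoop (vote : List (Int × Int)) : List Int → Int → Bool → Bool
  | [], _, _ => true
  | c :: rest, curr, decr =>
    let v := (PySem.Dict.mk vote).getD c 0
    let decr' := if decr && decide (v > curr) then false else decr
    if !decr' && decide (v < curr) then false
    else pvIsSpLoop vote rest v decr'

def is_single_peaked (axis : List Int) (vote : List (Int × Int)) : Bool :=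
  pvIsSpLoop vote axis ((vote.length : Int) + 1) true

-- ===== PORT B =====
-- the while loop of Source B: advance past the non-increasing prefix (returns the suffix of vals from index i)
def pvFindRise : List Int → List Int
  | x :: y :: rest => if y ≤ x then pvFindRise (y :: rest) else x :: y :: rest
  | l => l

-- the all(...) of Source B: the suffix is non-decreasing
def pvNonDecr : List Int → Bool
  | x :: y :: rest => decide (x ≤ y) && pvNonDecr (y :: rest)
  | _ => true

def is_single_peaked_alt (axis : List Int) (vote : List (Int × Int)) : Bool :=
  let vals := ((vote.length : Int) + 1) :: axis.map (fun c => (PySem.Dict.mk vote).getD c 0)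
  pvNonDecr (pvFindRise vals)

-- ===== PRECONDITION & SPEC =====
-- Pre_ excludes inputs on which Python A raises KeyError (an axis element that is not a key of vote) and
-- duplicate-key association lists (not valid Python dicts, and len(vote) would differ). Because A reads the
-- keys lazily it can return False before reaching a missing key; those inputs are also excluded (B raises there too).
def Pre_is_single_peaked (axis : List Int) (vote : List (Int × Int)) : Prop :=
  (∀ c ∈ axis, (PySem.Dict.mk vote).contains c = true) ∧ (vote.map Prod.fst).Nodup
instance (axis : List Int) (vote : List (Int × Int)) : Decidable (Pre_is_single_peaked axis vote) := by unfold Pre_is_single_peaked; infer_instance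

def pvWitness_is_single_peaked : List Int × (List (Int × Int)) := ([0, 1, 2], [(0, 2), (1, 0), (2, 1)])

def Spec_is_single_peaked (axis : List Int) (vote : List (Int × Int)) (out : Bool) : Prop := out = is_single_peaked_alt axis vote
instance (axis : List Int) (vote : List (Int × Int)) (out : Bool) : Decidable (Spec_is_single_peaked axis vote out) := by unfold Spec_is_single_peaked; infer_instance

-- ===== CLAIM (what is proved, stated in full; the proofs are below) =====
def Claim_equal_is_single_peaked : Prop := ∀ (axis : List Int) (vote : List (Int × Int)), Dom_is_single_peaked axis vote → Pre_is_single_peaked axis vote → Spec_is_single_peaked axis vote (is_single_peaked axis vote)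

-- ===== LEMMAS AND PROOFS =====
-- Loop invariant: with decr = true A's loop from curr computes B's two-phase scan of curr :: values;
-- with decr = false it computes the non-decreasing check of curr :: values.
theorem pvIsSpLoop_eq (vote : List (Int × Int)) (l : List Int) :
    ∀ curr : Int,
      pvIsSpLoop vote l curr true
        = pvNonDecr (pvFindRise (curr :: l.map (fun c => (PySem.Dict.mk vote).getD c 0)))
      ∧ pvIsSpLoop vote l curr false
        = pvNonDecr (curr :: l.map (fun c => (PySem.Dict.mk vote).getD c 0)) := by
  induction l with
  | nil => intro curr; simp [pvIsSpLoop, pvFindRise, pvNonDecr]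
  | cons c rest ih =>
    intro curr
    simp only [pvIsSpLoop, List.map_cons]
    generalize (PySem.Dict.mk vote).getD c 0 = v
    constructor
    · rcases lt_or_ge curr v with h | h
      · -- strict increase: flag flips; v < curr impossible
        have h1 : ¬ v < curr := by omega
        have h2 : ¬ v ≤ curr := by omega
        simp [h, h1, h2, pvFindRise, pvNonDecr, (ih v).2, le_of_lt h]
      · -- v ≤ curr: stay in descent, pvFindRise skips
        have h1 : ¬ curr < v := by omega
        simp [h1, pvFindRise, h, (ih v).1]
    · rcases lt_or_ge v curr with h | h
      · have h1 : ¬ curr ≤ v := by omega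
        simp [h, h1, pvNonDecr]
      · have h1 : ¬ v < curr := by omega
        simp [h1, pvNonDecr, h, (ih v).2]

-- ===== VERDICT (by name: the statement is the Claim_ definition above) =====
theorem is_single_peaked_spec : Claim_equal_is_single_peaked := by
  intro axis vote _ _
  unfold Spec_is_single_peaked is_single_peaked is_single_peaked_alt
  exact (pvIsSpLoop_eq vote axis ((vote.length : Int) + 1)).1
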